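-- pv_equiv track=rewrite | github.com/bracket/handsome | handsome/Tile.py | strides
-- ===== SOURCE A (Python) =====
-- def strides(start, stop, step=1):
--     begin, end = None, None
--
--     for i in range(start, stop, step):
--         begin,end = end,i
--         if begin is None:
--             continue
--         yield (begin, end)
--
--     if end is not None:
--         yield (end, stop)
-- ===== SOURCE B (Python) =====
-- def strides(start, stop, step=1):
--     pts = list(range(start, stop, step))
--     pts.append(stop)
--     yield from zip(pts, pts[1:])
-- ===== Notes on version B (the rewrite author's own statement) =====
-- stated objective: idiomatic
-- what changed: B materializes the boundary list range(start,stop,step)+[stop] and yields zip(pts, pts[1:]), replacing A's rolling (begin,end) state with its first-iteration skip and trailing conditional yield.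
import Mathlib
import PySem

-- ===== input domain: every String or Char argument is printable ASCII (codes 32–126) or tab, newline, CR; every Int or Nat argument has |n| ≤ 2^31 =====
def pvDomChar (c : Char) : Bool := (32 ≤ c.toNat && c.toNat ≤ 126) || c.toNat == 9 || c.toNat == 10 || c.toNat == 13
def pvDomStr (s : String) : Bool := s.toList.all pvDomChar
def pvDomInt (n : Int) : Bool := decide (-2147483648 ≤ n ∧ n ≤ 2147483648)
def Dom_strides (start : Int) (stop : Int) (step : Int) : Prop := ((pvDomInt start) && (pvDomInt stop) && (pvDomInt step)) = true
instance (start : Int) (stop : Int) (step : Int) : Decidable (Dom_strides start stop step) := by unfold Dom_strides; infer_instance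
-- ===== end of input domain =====

-- B replaces A's rolling (begin,end) generator state by materializing the boundary
-- list range(start,stop,step)+[stop] and zipping it with its tail (idiomatic; equivalence
-- is about the list of yielded pairs).

-- ===== PORT A =====
-- loop state: (begin, end, accumulated yields)
def stridesStep (s : Option Int × Option Int × List (Int × Int)) (i : Int) :
    Option Int × Option Int × List (Int × Int) :=
  let begin := s.2.1            -- begin,end = end,i
  let acc := s.2.2
  match begin with
  | none => (begin, some i, acc)          -- if begin is None: continue
  | some b => (begin, some i, acc ++ [(b, i)])   -- yield (begin, end)

def strides (start : Int) (stop : Int) (step : Int) : List (Int × Int) :=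
  let st := (PySem.List.pyRange start stop step).foldl stridesStep (none, none, [])
  match st.2.1 with
  | none => st.2.2
  | some e => st.2.2 ++ [(e, stop)]       -- if end is not None: yield (end, stop)

-- ===== PORT B =====
def strides_alt (start : Int) (stop : Int) (step : Int) : List (Int × Int) :=
  let pts := PySem.List.pyRange start stop step ++ [stop]
  List.zip pts pts.tail

-- ===== PRECONDITION & SPEC =====
-- step = 0 makes Python's range raise ValueError (on first iteration of the generator).
def Pre_strides (start : Int) (stop : Int) (step : Int) : Prop := step ≠ 0
instance (start : Int) (stop : Int) (step : Int) : Decidable (Pre_strides start stop step) := by unfold Pre_strides; infer_instance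
def pvWitness_strides : Int × Int × Int := (0, 7, 2)
def Spec_strides (start : Int) (stop : Int) (step : Int) (out : List (Int × Int)) : Prop := out = strides_alt start stop step
instance (start : Int) (stop : Int) (step : Int) (out : List (Int × Int)) : Decidable (Spec_strides start stop step out) := by unfold Spec_strides; infer_instance

-- ===== CLAIM =====
def Claim_equal_strides : Prop := ∀ (start : Int) (stop : Int) (step : Int), Dom_strides start stop step → Pre_strides start stop step → Spec_strides start stop step (strides start stop step)

-- ===== LEMMAS AND PROOFS =====

-- Loop invariant: once end = some v, the remaining fold + final yield appends exactly
-- the consecutive pairs of v :: l ++ [stop].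
theorem strides_fold_some (stop : Int) (l : List Int) (b : Option Int) (v : Int)
    (acc : List (Int × Int)) :
    (match (l.foldl stridesStep (b, some v, acc)).2.1 with
      | none => (l.foldl stridesStep (b, some v, acc)).2.2
      | some e => (l.foldl stridesStep (b, some v, acc)).2.2 ++ [(e, stop)]) =
    acc ++ List.zip (v :: (l ++ [stop])) (l ++ [stop]) := by
  induction l generalizing b v acc with
  | nil => simp [stridesStep]
  | cons i t ih =>
      cases b with
      | none =>
          simp only [List.foldl_cons, stridesStep]
          rw [ih]
          simp [List.zip]
      | some w =>
          simp only [List.foldl_cons, stridesStep]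
          rw [ih]
          simp [List.zip]

-- ===== VERDICT =====
theorem strides_spec : Claim_equal_strides := by
  intro start stop step _ _
  unfold Spec_strides strides strides_alt
  cases h : PySem.List.pyRange start stop step with
  | nil => simp
  | cons i t =>
      simp only [List.foldl_cons, stridesStep]
      rw [strides_fold_some]
      simp [List.zip]
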